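-- pv_equiv track=rewrite | github.com/cbrady392/aoc2022 | 13/main.py | read_packets
-- ===== SOURCE A (Python) =====
-- def read_packets(lines):
--     packet_pairs = []
--     packet1 = ''
--     packet2 = ''
--     one_read  = False
--     for line in lines:
--         if line == '':
--
--             one_read = False
--             continue
--         if one_read:
--             packet2 = line
--             packet_pairs.append((packet1, packet2))
--         else:
--             packet1 = line
--             one_read = True
--     return packet_pairs
-- ===== SOURCE B (Python) =====
-- def read_packets(lines):
--     # Two-phase decomposition: group consecutive non-empty lines into blocks,
--     # then pair each block's head with every later line of the block.
--     groups = []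
--     cur = []
--     for line in lines:
--         if line == '':
--             if cur:
--                 groups.append(cur)
--             cur = []
--         else:
--             cur.append(line)
--     if cur:
--         groups.append(cur)
--     return [(g[0], x) for g in groups for x in g[1:]]
-- ===== Notes on version B (the rewrite author's own statement) =====
-- stated objective: alternative
-- what changed: Replaced the one-pass four-variable state machine by a two-phase decomposition: first group consecutive non-empty lines into blocks, then emit (head, x) for every later line x of each block.
import Mathlib
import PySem

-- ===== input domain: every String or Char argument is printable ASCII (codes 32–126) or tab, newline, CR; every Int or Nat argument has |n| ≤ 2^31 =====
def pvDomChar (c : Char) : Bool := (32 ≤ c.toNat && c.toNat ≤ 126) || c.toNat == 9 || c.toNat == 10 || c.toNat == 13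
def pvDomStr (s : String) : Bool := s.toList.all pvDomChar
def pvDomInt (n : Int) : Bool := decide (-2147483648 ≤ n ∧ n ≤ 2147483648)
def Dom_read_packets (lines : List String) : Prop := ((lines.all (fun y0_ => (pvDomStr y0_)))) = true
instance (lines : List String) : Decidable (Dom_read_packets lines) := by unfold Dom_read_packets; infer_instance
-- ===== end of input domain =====

-- B replaces A's one-pass state machine by a group-then-pair two-phase decomposition (objective: alternative).

-- ===== PORT A =====
-- state: (packet_pairs, packet1, packet2, one_read)
def readPacketsStepA (st : List (String × String) × String × String × Bool) (line : String) :
    List (String × String) × String × String × Bool :=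
  let (packet_pairs, packet1, packet2, one_read) := st
  if line = "" then (packet_pairs, packet1, packet2, false)
  else if one_read then (packet_pairs ++ [(packet1, line)], packet1, line, one_read)
  else (packet_pairs, line, packet2, true)

def read_packets (lines : List String) : List (String × String) :=
  (lines.foldl readPacketsStepA ([], "", "", false)).1

-- ===== PORT B =====
-- phase 1 state: (groups, cur)
def readPacketsStepB (st : List (List String) × List String) (line : String) :
    List (List String) × List String :=
  if line = "" then (if st.2 ≠ [] then st.1 ++ [st.2] else st.1, [])
  else (st.1, st.2 ++ [line])

def pairsOfGroup (g : List String) : List (String × String) :=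
  match g with
  | [] => []
  | h :: t => t.map (fun x => (h, x))

def read_packets_alt (lines : List String) : List (String × String) :=
  let st := lines.foldl readPacketsStepB ([], [])
  let groups := if st.2 ≠ [] then st.1 ++ [st.2] else st.1
  groups.flatMap pairsOfGroup

-- ===== PRECONDITION & SPEC =====
def Spec_read_packets (lines : List String) (out : List (String × String)) : Prop := out = read_packets_alt lines
instance (lines : List String) (out : List (String × String)) : Decidable (Spec_read_packets lines out) := by unfold Spec_read_packets; infer_instance

-- ===== CLAIM (what is proved, stated in full; the proofs are below) =====
def Claim_equal_read_packets : Prop := ∀ (lines : List String), Dom_read_packets lines → Spec_read_packets lines (read_packets lines)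

-- ===== LEMMAS AND PROOFS =====

-- Relates A's running state to B's grouping state and proves the fold results agree.
theorem read_packets_key :
    ∀ (lines : List String) (gs : List (List String)) (cur : List String)
      (p1 p2 : String),
      (cur ≠ [] → cur.head? = some p1) →
      (lines.foldl readPacketsStepA
        (gs.flatMap pairsOfGroup ++ pairsOfGroup cur, p1, p2, !cur.isEmpty)).1
      = (let st := lines.foldl readPacketsStepB (gs, cur);
         (if st.2 ≠ [] then st.1 ++ [st.2] else st.1).flatMap pairsOfGroup) := by
  intro lines
  induction lines with
  | nil =>
    intro gs cur p1 p2 _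
    cases cur with
    | nil => simp [pairsOfGroup]
    | cons h t => simp [pairsOfGroup, List.flatMap_append]
  | cons line rest ih =>
    intro gs cur p1 p2 hhead
    simp only [List.foldl_cons]
    by_cases hline : line = ""
    · subst hline
      cases cur with
      | nil =>
        simpa [readPacketsStepA, readPacketsStepB, pairsOfGroup] using
          ih gs [] p1 p2 (by simp)
      | cons h t =>
        have := ih (gs ++ [h :: t]) [] p1 p2 (by simp)
        simpa [readPacketsStepA, readPacketsStepB, pairsOfGroup,
          List.flatMap_append] using this
    · cases cur with
      | nil =>
        have := ih gs [line] line p2 (by simp)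
        simpa [readPacketsStepA, readPacketsStepB, hline, pairsOfGroup] using this
      | cons h t =>
        have hp1 : h = p1 := by
          have := hhead (by simp)
          simpa using this
        subst hp1
        have := ih gs (h :: t ++ [line]) h line (by simp)
        simpa [readPacketsStepA, readPacketsStepB, hline, pairsOfGroup,
          List.map_append] using this

-- ===== VERDICT (by name: the statement is the Claim_ definition above) =====
theorem read_packets_spec : Claim_equal_read_packets := by
  intro lines _
  unfold Spec_read_packets read_packets read_packets_alt
  simpa [pairsOfGroup] using read_packets_key lines [] [] "" "" (by simp)
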